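-- pv_equiv track=rewrite | github.com/kzCassie/CL-NLG | common/curriculum.py | intent_slot_score_fn
-- ===== SOURCE A (Python) =====
-- def intent_slot_score_fn(intent, utterance):
--     def count_intent_slot(intent):
--         import re
--         intent_sep = '|'
--         slot_sep = ';'
--         # pattern = re.compile(r'\((.*?)\)')
--
--         intents = intent.split(intent_sep)
--         num_intents, num_slots = len(intents), 0
--
--         for i in intents:
--             slot_vals = i.split(slot_sep)
--             num_slots += len(slot_vals)
--
--         return num_intents, num_slots
--
--     num_intents, num_slots = count_intent_slot(intent)
--     return num_intents * 100 + num_slots  # TODO: this is evil. Assume num_slot_per_intent < 100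
-- ===== SOURCE B (Python) =====
-- def intent_slot_score_fn(intent, utterance):
--     num_intents = intent.count('|') + 1
--     num_slots = intent.count(';') + num_intents
--     return num_intents * 100 + num_slots
-- ===== Notes on version B (the rewrite author's own statement) =====
-- stated objective: simpler
-- what changed: Replaces the split-into-lists plus per-part split-and-sum loop with a closed form: num_intents = count('|')+1 and num_slots = count(';')+num_intents, since '|'-splitting preserves the total ';' count and each part contributes count(';')+1 slots.
import Mathlib
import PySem

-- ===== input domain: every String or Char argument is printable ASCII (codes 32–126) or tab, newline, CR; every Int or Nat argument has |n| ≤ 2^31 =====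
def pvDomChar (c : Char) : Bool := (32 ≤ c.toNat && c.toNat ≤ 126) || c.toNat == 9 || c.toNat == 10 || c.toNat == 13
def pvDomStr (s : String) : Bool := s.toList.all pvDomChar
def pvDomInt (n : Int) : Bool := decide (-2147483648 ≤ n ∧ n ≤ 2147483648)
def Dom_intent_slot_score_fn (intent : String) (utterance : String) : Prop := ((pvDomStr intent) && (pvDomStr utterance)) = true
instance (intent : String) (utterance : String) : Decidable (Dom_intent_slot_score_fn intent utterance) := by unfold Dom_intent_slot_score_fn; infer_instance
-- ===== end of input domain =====

-- B replaces A's split-into-lists and per-part loop with a closed form over two character counts (same return value; 'utterance' is unused by both).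


-- ===== PORT A =====
-- split with the nonempty literal separators '|' and ';' never raises, so the port works on the
-- List Char side with PySem.Chars.splitOn (the sep ≠ "" form of str.split, exact there).
def intent_slot_score_fn (intent : String) (_utterance : String) : Int :=
  let intents := PySem.Chars.splitOn intent.toList ['|']
  let num_intents : Int := intents.length
  let num_slots : Int := intents.foldl (fun acc i => acc + ((PySem.Chars.splitOn i [';']).length : Int)) 0
  num_intents * 100 + num_slots

-- ===== PORT B =====
def intent_slot_score_fn_alt (intent : String) (_utterance : String) : Int :=
  let num_intents : Int := (PySem.Str.count intent "|" : Int) + 1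
  let num_slots : Int := (PySem.Str.count intent ";" : Int) + num_intents
  num_intents * 100 + num_slots

-- ===== PRECONDITION & SPEC =====
def Spec_intent_slot_score_fn (intent : String) (utterance : String) (out : Int) : Prop := out = intent_slot_score_fn_alt intent utterance
instance (intent : String) (utterance : String) (out : Int) : Decidable (Spec_intent_slot_score_fn intent utterance out) := by unfold Spec_intent_slot_score_fn; infer_instance

-- ===== CLAIM (what is proved, stated in full; the proofs are below) =====
def Claim_equal_intent_slot_score_fn : Prop := ∀ (intent : String) (utterance : String), Dom_intent_slot_score_fn intent utterance → Spec_intent_slot_score_fn intent utterance (intent_slot_score_fn intent utterance)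

-- ===== LEMMAS AND PROOFS =====

-- one step of splitOn.go on a single-character separator
theorem go_cons (c hd : Char) (n : Nat) (t cur : List Char) (acc : List (List Char)) :
    PySem.Chars.splitOn.go [c] (n + 1) (hd :: t) cur acc =
      if c = hd then PySem.Chars.splitOn.go [c] n t [] (cur.reverse :: acc)
      else PySem.Chars.splitOn.go [c] n t (hd :: cur) acc := by
  by_cases h : c = hd <;> simp [PySem.Chars.splitOn.go, List.isPrefixOf, h]

-- one step of count.go on a single-character needle
theorem cgo_cons (c hd : Char) (n : Nat) (t : List Char) (acc : Nat) :
    PySem.Chars.count.go [c] (n + 1) (hd :: t) acc =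
      if c = hd then PySem.Chars.count.go [c] n t (acc + 1)
      else PySem.Chars.count.go [c] n t acc := by
  by_cases h : c = hd <;> simp [PySem.Chars.count.go, List.isPrefixOf, h]

-- splitOn.go on a single-char separator: the number of parts is the separator count plus one.
theorem go_len (c : Char) : ∀ (fuel : Nat) (l cur : List Char) (acc : List (List Char)),
    l.length < fuel →
    (PySem.Chars.splitOn.go [c] fuel l cur acc).length = acc.length + 1 + l.count c := by
  intro fuel
  induction fuel with
  | zero => intro l cur acc h; omega
  | succ n ih =>
    intro l cur acc h
    cases l with
    | nil => simp [PySem.Chars.splitOn.go]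
    | cons hd t =>
      rw [go_cons]
      by_cases hc : c = hd
      · rw [if_pos hc, ih t [] (cur.reverse :: acc) (by simpa using Nat.lt_of_succ_lt_succ h)]
        simp [hc]; omega
      · rw [if_neg hc, ih t (hd :: cur) acc (by simpa using Nat.lt_of_succ_lt_succ h)]
        simp [Ne.symm hc]

-- splitOn.go on separator c: counting a different character d across all parts
-- gives the accumulated count plus the pending-prefix count plus the remaining-input count.
theorem go_sum (c d : Char) (hdc : d ≠ c) : ∀ (fuel : Nat) (l cur : List Char) (acc : List (List Char)),
    l.length < fuel →
    ((PySem.Chars.splitOn.go [c] fuel l cur acc).map (fun p => p.count d)).sum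
      = (acc.map (fun p => p.count d)).sum + cur.count d + l.count d := by
  intro fuel
  induction fuel with
  | zero => intro l cur acc h; omega
  | succ n ih =>
    intro l cur acc h
    cases l with
    | nil => simp [PySem.Chars.splitOn.go]
    | cons hd t =>
      rw [go_cons]
      by_cases hc : c = hd
      · rw [if_pos hc, ih t [] (cur.reverse :: acc) (by simpa using Nat.lt_of_succ_lt_succ h)]
        subst hc
        simp [Ne.symm hdc]
        omega
      · rw [if_neg hc, ih t (hd :: cur) acc (by simpa using Nat.lt_of_succ_lt_succ h)]
        by_cases hdh : d = hd
        · subst hdh; simp; omega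
        · simp [show hd ≠ d from fun e => hdh e.symm]

-- count.go on a single-char needle is the character count.
theorem count_go (c : Char) : ∀ (fuel : Nat) (l : List Char) (acc : Nat),
    l.length ≤ fuel →
    PySem.Chars.count.go [c] fuel l acc = acc + l.count c := by
  intro fuel
  induction fuel with
  | zero => intro l acc h
            have : l = [] := List.eq_nil_of_length_eq_zero (Nat.le_zero.mp h)
            subst this; simp [PySem.Chars.count.go]
  | succ n ih =>
    intro l acc h
    cases l with
    | nil => simp [PySem.Chars.count.go]
    | cons hd t =>
      rw [cgo_cons]
      by_cases hc : c = hd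
      · rw [if_pos hc, ih t (acc + 1) (by simpa using Nat.le_of_succ_le_succ h)]
        simp [hc]; omega
      · rw [if_neg hc, ih t acc (by simpa using Nat.le_of_succ_le_succ h)]
        simp [Ne.symm hc]

theorem splitOn_single_len (c : Char) (cs : List Char) :
    (PySem.Chars.splitOn cs [c]).length = cs.count c + 1 := by
  unfold PySem.Chars.splitOn
  rw [go_len c (cs.length + 1) cs [] [] (by omega)]
  simp; omega

theorem count_single (c : Char) (cs : List Char) :
    PySem.Chars.count cs [c] = cs.count c := by
  unfold PySem.Chars.count
  simp [count_go c cs.length cs 0 (le_refl _)]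

theorem foldl_add_map (f : List Char → Int) : ∀ (l : List (List Char)) (a : Int),
    l.foldl (fun acc i => acc + f i) a = a + (l.map f).sum := by
  intro l
  induction l with
  | nil => simp
  | cons h t ih => intro a; simp [List.foldl_cons, ih]; ring

-- ===== VERDICT (by name: the statement is the Claim_ definition above) =====
theorem intent_slot_score_fn_spec : Claim_equal_intent_slot_score_fn := by
  intro intent utterance _
  unfold Spec_intent_slot_score_fn intent_slot_score_fn intent_slot_score_fn_alt
  simp only [PySem.Str.count_eq]
  rw [show ("|".toList) = ['|'] from rfl, show (";".toList) = [';'] from rfl]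
  rw [count_single, count_single]
  rw [foldl_add_map (fun i => ((PySem.Chars.splitOn i [';']).length : Int))]
  have hmap : (PySem.Chars.splitOn intent.toList ['|']).map
      (fun i => ((PySem.Chars.splitOn i [';']).length : Int))
      = (PySem.Chars.splitOn intent.toList ['|']).map (fun i => ((i.count ';' : Int) + 1)) := by
    apply List.map_congr_left
    intro p _
    rw [splitOn_single_len]
    push_cast
    ring
  rw [hmap]
  have hsum : ((PySem.Chars.splitOn intent.toList ['|']).map (fun p => p.count ';')).sum
      = intent.toList.count ';' := by
    unfold PySem.Chars.splitOn
    rw [go_sum '|' ';' (by decide) (intent.toList.length + 1) intent.toList [] [] (by omega)]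
    simp
  have hsum' : ((PySem.Chars.splitOn intent.toList ['|']).map (fun p => (p.count ';' : Int))).sum
      = (intent.toList.count ';' : Int) := by
    have := congrArg (fun n : Nat => (n : Int)) hsum
    push_cast at this
    simpa [Function.comp] using this
  have hlen := splitOn_single_len '|' intent.toList
  have hsplit : ((PySem.Chars.splitOn intent.toList ['|']).map (fun i => ((i.count ';' : Int) + 1))).sum
      = ((PySem.Chars.splitOn intent.toList ['|']).map (fun p => (p.count ';' : Int))).sum
        + ((PySem.Chars.splitOn intent.toList ['|']).length : Int) := by
    induction (PySem.Chars.splitOn intent.toList ['|']) with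
    | nil => simp
    | cons h t ih => simp [ih]; ring
  rw [hsplit, hsum', hlen]
  push_cast; ring
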